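-- pv_equiv track=rewrite | github.com/ShogoNoguchi/GenAI-EvalApp-ForAD | eval_unicontrol_waymo_old1.py | _canonicalize_label
-- ===== SOURCE A (Python) =====
-- from typing import List, Tuple, Dict, Any, Optional
--
-- _CANON_PRIOR = [
--     # より「具体的」→「汎用」の順で優先（同長の場合はこの順を優先）
--     "speed limit sign", "stop sign", "crosswalk sign", "construction sign",
--     "traffic light", "traffic cone", "traffic sign",
--     "motorcycle", "bicycle", "truck", "bus", "car",
--     "pedestrian", "person",
-- ]
--
-- def _canonicalize_label(raw: str, prompts: List[str]) -> str:
--     """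
--     Grounding DINO が返す複合ラベル（例: 'car bus', 'person pedestrian'）を
--     事前に与えた prompts 内の「最も具体的」な1語に正規化する。
--     - 長い語を優先、同長は _CANON_PRIOR の順でタイブレーク
--     - pedestrian は 'person' に吸収
--     """
--     if not isinstance(raw, str):
--         return str(raw)
--
--     s = raw.lower().strip()
--     # 候補抽出（部分一致）
--     cands = [p for p in prompts if p in s]
--     if not cands:
--         return s
--
--     # 長さ降順で並べ、同長は _CANON_PRIOR の順で優先
--     def _key(p):
--         return (len(p), -_CANON_PRIOR.index(p) if p in _CANON_PRIOR else 0)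
--     cands.sort(key=_key, reverse=True)
--     canon = cands[0]
--
--     # 同義吸収
--     if canon == "pedestrian":
--         return "person"
--     return canon
-- ===== SOURCE B (Python) =====
-- from typing import List
--
-- _CANON_PRIOR = [
--     "speed limit sign", "stop sign", "crosswalk sign", "construction sign",
--     "traffic light", "traffic cone", "traffic sign",
--     "motorcycle", "bicycle", "truck", "bus", "car",
--     "pedestrian", "person",
-- ]
--
--
-- def _key(p):
--     return (len(p), -_CANON_PRIOR.index(p) if p in _CANON_PRIOR else 0)
--
--
-- def _canonicalize_label(raw: str, prompts: List[str]) -> str: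
--     if not isinstance(raw, str):
--         return str(raw)
--     s = raw.lower().strip()
--     best = None
--     for p in prompts:
--         if p in s and (best is None or _key(best) < _key(p)):
--             best = p
--     if best is None:
--         return s
--     return "person" if best == "pedestrian" else best
-- ===== Notes on version B (the rewrite author's own statement) =====
-- stated objective: simpler
-- what changed: Replaces building a candidate list and sorting it (reverse=True, taking element [0]) with a single pass over prompts that keeps the running best under the same (length, priority) key, so no intermediate list and no sort.
import Mathlib
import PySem

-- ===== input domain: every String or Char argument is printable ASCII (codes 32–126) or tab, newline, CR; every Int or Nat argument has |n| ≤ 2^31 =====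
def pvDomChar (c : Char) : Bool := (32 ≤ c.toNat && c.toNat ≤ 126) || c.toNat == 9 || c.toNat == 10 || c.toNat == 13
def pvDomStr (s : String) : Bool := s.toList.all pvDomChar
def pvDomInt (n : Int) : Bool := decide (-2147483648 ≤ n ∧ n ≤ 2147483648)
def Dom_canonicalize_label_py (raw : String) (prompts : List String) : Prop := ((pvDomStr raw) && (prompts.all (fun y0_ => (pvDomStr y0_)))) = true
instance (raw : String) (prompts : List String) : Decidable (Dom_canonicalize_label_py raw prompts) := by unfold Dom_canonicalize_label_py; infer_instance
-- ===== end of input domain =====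

-- B replaces A's build-candidate-list-then-sort(reverse=True)[0] by a single pass
-- keeping the running best under the same (length, priority) key; same return value.

-- ===== PORT A =====
-- module-level _CANON_PRIOR
def pvCanonPrior : List String :=
  ["speed limit sign", "stop sign", "crosswalk sign", "construction sign",
   "traffic light", "traffic cone", "traffic sign",
   "motorcycle", "bicycle", "truck", "bus", "car",
   "pedestrian", "person"]

-- _key(p) = (len(p), -_CANON_PRIOR.index(p) if p in _CANON_PRIOR else 0)  (shared by both Pythons)
def pvKey1 (p : String) : Int := PySem.Str.len p
def pvKey2 (p : String) : Int :=
  if p ∈ pvCanonPrior then -((((PySem.List.index? pvCanonPrior p).getD 0) : Nat) : Int) else 0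

-- port of A; the `isinstance(raw, str)` branch is vacuous under the type convention (raw : String)
def canonicalize_label_py (raw : String) (prompts : List String) : String :=
  let s := PySem.Str.strip (PySem.Str.lower raw)
  let cands := prompts.filter (fun p => PySem.Str.isIn p s)
  if cands.isEmpty then s
  else
    let sortedC := PySem.List.sorted2 cands pvKey1 pvKey2 true
    let canon := sortedC.headD ""   -- cands[0] after cands.sort(key=_key, reverse=True)
    if canon = "pedestrian" then "person" else canon

-- ===== PORT B =====
-- Python tuple comparison _key(b) < _key(p)
def pvLtKey (b p : String) : Bool :=
  decide (pvKey1 b < pvKey1 p) || (decide (pvKey1 b = pvKey1 p) && decide (pvKey2 b < pvKey2 p))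

def canonicalize_label_py_alt (raw : String) (prompts : List String) : String :=
  let s := PySem.Str.strip (PySem.Str.lower raw)
  let best := prompts.foldl (fun acc p =>
      if PySem.Str.isIn p s then
        match acc with
        | none => some p
        | some b => if pvLtKey b p then some p else acc
      else acc)
    (none : Option String)
  match best with
  | none => s
  | some b => if b = "pedestrian" then "person" else b

-- ===== PRECONDITION & SPEC =====
def Spec_canonicalize_label_py (raw : String) (prompts : List String) (out : String) : Prop := out = canonicalize_label_py_alt raw prompts
instance (raw : String) (prompts : List String) (out : String) : Decidable (Spec_canonicalize_label_py raw prompts out) := by unfold Spec_canonicalize_label_py; infer_instance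

-- ===== CLAIM (what is proved, stated in full; the proofs are below) =====
def Claim_equal_canonicalize_label_py : Prop := ∀ (raw : String) (prompts : List String), Dom_canonicalize_label_py raw prompts → Spec_canonicalize_label_py raw prompts (canonicalize_label_py raw prompts)

-- ===== LEMMAS AND PROOFS =====

-- head of an insertBy: the new element takes the head iff `before x (old head)`
lemma head?_insertBy (before : String → String → Bool) (x : String) (acc : List String) :
    (PySem.List.insertBy before x acc).head? =
      some (match acc.head? with
            | none => x
            | some y => if before x y then x else y) := by
  cases acc with
  | nil => simp [PySem.List.insertBy]
  | cons y ys => by_cases h : before x y <;> simp [PySem.List.insertBy, h]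

-- head of the insertion-sort fold is the running "first maximal" fold
lemma head?_foldl_insertBy (before : String → String → Bool) (xs : List String) :
    ∀ (acc : List String),
    (xs.foldl (fun a x => PySem.List.insertBy before x a) acc).head? =
      xs.foldl (fun o x => match o with
        | none => some x
        | some m => if before x m then some x else some m) acc.head? := by
  induction xs with
  | nil => intro acc; rfl
  | cons x t ih =>
    intro acc
    simp only [List.foldl_cons, ih, head?_insertBy]
    congr 1
    cases acc with
    | nil => rfl
    | cons y ys =>
      simp only [List.head?_cons]
      by_cases h : before x y <;> simp [h]

-- A's sorted2 comparison coincides with B's lexicographic tuple-<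
lemma lt_eq_pvLtKey (m x : String) :
    (decide (pvKey1 m < pvKey1 x) || !decide (pvKey1 x < pvKey1 m) && decide (pvKey2 m < pvKey2 x))
      = pvLtKey m x := by
  unfold pvLtKey
  rcases lt_trichotomy (pvKey1 m) (pvKey1 x) with h | h | h
  · simp [h]
  · simp [h]
  · simp [h]
    omega

-- A's guarded sort-and-take-head equals B's running-best fold, on any candidate list
lemma sort_head_eq_fold (s : String) (cands : List String) :
    (if cands.isEmpty then s
     else
       let canon := (PySem.List.sorted2 cands pvKey1 pvKey2 true).headD ""
       if canon = "pedestrian" then "person" else canon)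
    = match cands.foldl (fun acc p => match acc with
        | none => some p
        | some b => if pvLtKey b p then some p else acc) (none : Option String) with
      | none => s
      | some b => if b = "pedestrian" then "person" else b := by
  have hkey : (PySem.List.sorted2 cands pvKey1 pvKey2 true).head?
      = cands.foldl (fun acc p => match acc with
          | none => some p
          | some b => if pvLtKey b p then some p else acc) (none : Option String) := by
    have hhead := head?_foldl_insertBy
        (fun a b => decide (pvKey1 b < pvKey1 a) || !decide (pvKey1 a < pvKey1 b) && decide (pvKey2 b < pvKey2 a))
        cands []
    have hsorted : PySem.List.sorted2 cands pvKey1 pvKey2 true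
        = cands.foldl (fun a x => PySem.List.insertBy
            (fun a b => decide (pvKey1 b < pvKey1 a) || !decide (pvKey1 a < pvKey1 b) && decide (pvKey2 b < pvKey2 a)) x a) [] := by
      simp [PySem.List.sorted2]
    rw [hsorted]
    have hbody : (cands.foldl (fun o x => match o with
          | none => some x
          | some m => if (decide (pvKey1 m < pvKey1 x) || !decide (pvKey1 x < pvKey1 m) && decide (pvKey2 m < pvKey2 x)) = true
                      then some x else some m) (none : Option String))
        = cands.foldl (fun acc p => match acc with
          | none => some p
          | some b => if pvLtKey b p then some p else acc) (none : Option String) := by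
      apply PySem.List.foldl_congr_mem
      intro acc x _
      cases acc with
      | none => rfl
      | some m => simp [lt_eq_pvLtKey m x]
    rw [← hbody]
    simpa using hhead
  cases hcnil : cands with
  | nil => simp
  | cons c t =>
    rw [hcnil] at hkey
    have hperm := PySem.List.sorted2_perm (c :: t) pvKey1 pvKey2 true
    have hsne : PySem.List.sorted2 (c :: t) pvKey1 pvKey2 true ≠ [] := by
      intro h0
      rw [h0] at hperm
      exact absurd (List.nil_perm.mp hperm) (List.cons_ne_nil c t)
    obtain ⟨canon, rest, heq⟩ := List.exists_cons_of_ne_nil hsne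
    rw [← hkey, heq]
    simp

-- ===== VERDICT (by name: the statement is the Claim_ definition above) =====
theorem canonicalize_label_py_spec : Claim_equal_canonicalize_label_py := by
  intro raw prompts _
  unfold Spec_canonicalize_label_py canonicalize_label_py canonicalize_label_py_alt
  dsimp only
  rw [PySem.List.foldl_if_eq_foldl_filter (p := fun p => PySem.Str.isIn p (PySem.Str.strip (PySem.Str.lower raw)))]
  exact sort_head_eq_fold _ _
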